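-- pv_equiv track=rewrite | github.com/EsYoon7/RLHF-TLCR | dataset/get_token_distance.py | label_elements_with_changes
-- ===== SOURCE A (Python) =====
-- def label_elements_with_changes(A, B):
--     # Initialize the DP matrix with operation counts and back pointers
--     dp = [[(0, None) for _ in range(len(B) + 1)] for _ in range(len(A) + 1)]
--
--     # Initialize base cases
--     for i in range(1, len(A) + 1):
--         dp[i][0] = (i, 'D')
--     for j in range(1, len(B) + 1):
--         dp[0][j] = (j, 'A')
--
--     # Fill DP matrix
--     for i in range(1, len(A) + 1):
--         for j in range(1, len(B) + 1):
--             if A[i-1] == B[j-1]: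
--                 dp[i][j] = (dp[i-1][j-1][0], 'U')
--             else:
--                 operations = [
--                     (dp[i-1][j][0] + 1, 'D'),
--                     (dp[i][j-1][0] + 1, 'A'),
--                     (dp[i-1][j-1][0] + 1, 'S')
--                 ]
--                 dp[i][j] = min(operations, key=lambda x: x[0])
--
--     # Backtrack to label elements
--     labeled_A, labeled_B = [], []
--     i, j = len(A), len(B)
--     while i > 0 or j > 0:
--         operation = dp[i][j][1]
--         if operation == 'D':
--             labeled_A.insert(0, 'D')
--             i -= 1
--         elif operation == 'A':
--             labeled_B.insert(0, 'A')
--             j -= 1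
--         elif operation == 'S':
--             labeled_A.insert(0, 'S')
--             labeled_B.insert(0, 'S')
--             i -= 1
--             j -= 1
--         elif operation == 'U':
--             labeled_A.insert(0, 'U')
--             labeled_B.insert(0, 'U')
--             i -= 1
--             j -= 1
--
--     # Handling cases where elements are added to B at the beginning
--     while j > 0:
--         labeled_B.insert(0, 'A')
--         j -= 1
--
--     # Handling cases where elements are deleted from A at the beginning
--     while i > 0:
--         labeled_A.insert(0, 'D')
--         i -= 1
--
--     return labeled_A, labeled_B
-- ===== SOURCE B (Python) =====
-- def label_elements_with_changes(A, B):
--     # Forward DP over a single rolling row whose cells carry the full edit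
--     # scripts as shared persistent cons chains (op, tail); no back-pointers
--     # and no traceback phase.
--     n, m = len(A), len(B)
--     prev = [(0, None, None)]
--     for _ in range(m):
--         c, sa, sb = prev[-1]
--         prev.append((c + 1, sa, ('A', sb)))
--     for i in range(1, n + 1):
--         ai = A[i - 1]
--         c0, sa0, sb0 = prev[0]
--         cur = [(c0 + 1, ('D', sa0), sb0)]
--         for j in range(1, m + 1):
--             up = prev[j]
--             left = cur[j - 1]
--             diag = prev[j - 1]
--             if ai == B[j - 1]:
--                 cur.append((diag[0], ('U', diag[1]), ('U', diag[2])))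
--             else:
--                 cd = up[0] + 1
--                 ca = left[0] + 1
--                 cs = diag[0] + 1
--                 if cd <= ca and cd <= cs:
--                     cur.append((cd, ('D', up[1]), up[2]))
--                 elif ca <= cs:
--                     cur.append((ca, left[1], ('A', left[2])))
--                 else:
--                     cur.append((cs, ('S', diag[1]), ('S', diag[2])))
--         prev = cur
--     _, sa, sb = prev[m]
--     la = []
--     while sa is not None:
--         la.append(sa[0])
--         sa = sa[1]
--     la.reverse()
--     lb = []
--     while sb is not None:
--         lb.append(sb[0])
--         sb = sb[1]
--     lb.reverse()
--     return la, lb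
-- ===== Notes on version B (the rewrite author's own statement) =====
-- stated objective: alternative
-- what changed: B runs a forward DP over one rolling row whose cells carry complete edit scripts as shared persistent cons chains, so there is no back-pointer matrix and no backtracking phase at all; A fills a full (cost,pointer) matrix and then traces back with insert(0).
import Mathlib
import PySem

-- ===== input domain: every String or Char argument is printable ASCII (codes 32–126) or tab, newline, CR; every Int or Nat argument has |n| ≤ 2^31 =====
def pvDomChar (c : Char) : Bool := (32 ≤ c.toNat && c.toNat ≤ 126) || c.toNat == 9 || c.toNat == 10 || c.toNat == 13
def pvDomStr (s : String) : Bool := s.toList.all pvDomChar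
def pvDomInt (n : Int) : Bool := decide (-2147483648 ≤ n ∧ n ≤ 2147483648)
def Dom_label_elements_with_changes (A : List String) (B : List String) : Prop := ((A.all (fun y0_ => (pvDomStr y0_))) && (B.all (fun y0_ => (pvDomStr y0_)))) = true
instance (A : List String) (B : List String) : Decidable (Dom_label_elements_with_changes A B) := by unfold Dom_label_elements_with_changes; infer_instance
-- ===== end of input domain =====

-- B replaces A's (cost, back-pointer) matrix + traceback by a forward DP over one rolling row whose
-- cells carry the complete edit scripts as shared cons chains; objective: alternative decomposition.

-- ===== PORT A =====
-- Python's min over the 3-element list [(c1,'D'),(c2,'A'),(c3,'S')] with key = cost: first minimal element.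
def pyMin3A (x y z : Int × Option String) : Int × Option String :=
  let m1 := if y.1 < x.1 then y else x
  if z.1 < m1.1 then z else m1

-- inner j-loop filling row i: walks B; `prev` is dp[i-1] from index j-1 on; `left` is dp[i][j-1]
def rowEntriesA (a : String) : List String → List (Int × Option String) → (Int × Option String) → List (Int × Option String)
  | [], _, _ => []
  | b :: bs, prev, left =>
    let diag := prev.headD (0, none)
    let down := prev.tail.headD (0, none)
    let e := if a = b then (diag.1, some "U")
             else pyMin3A (down.1 + 1, some "D") (left.1 + 1, some "A") (diag.1 + 1, some "S")
    e :: rowEntriesA a bs prev.tail e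

def rowA (a : String) (B : List String) (i : Int) (prev : List (Int × Option String)) : List (Int × Option String) :=
  (i, some "D") :: rowEntriesA a B prev (i, some "D")

-- outer i-loop over A
def dpRowsA (B : List String) : List String → Int → List (Int × Option String) → List (List (Int × Option String))
  | [], _, _ => []
  | a :: as_, i, prev =>
    let r := rowA a B i prev
    r :: dpRowsA B as_ (i + 1) r

-- row 0 after the base-case loop: dp[0][0] = (0, None), dp[0][j] = (j, 'A')
def row0A (m : Nat) : List (Int × Option String) :=
  (0, (none : Option String)) :: (List.range m).map (fun (j : Nat) => (((j : Int) + 1), some "A"))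

def dpA (A B : List String) : List (List (Int × Option String)) :=
  row0A B.length :: dpRowsA B A 1 (row0A B.length)

-- backtracking while-loop; fuel = i + j bounds the iterations (every Python iteration decreases i+j)
def backA (dp : List (List (Int × Option String))) : Nat → Nat → Nat → List String → List String → Nat × Nat × List String × List String
  | 0, i, j, la, lb => (i, j, la, lb)
  | fuel+1, i, j, la, lb =>
    if i = 0 ∧ j = 0 then (i, j, la, lb)
    else
      let op := ((dp.getD i []).getD j (0, none)).2
      if op = some "D" then backA dp fuel (i-1) j ("D" :: la) lb
      else if op = some "A" then backA dp fuel i (j-1) la ("A" :: lb)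
      else if op = some "S" then backA dp fuel (i-1) (j-1) ("S" :: la) ("S" :: lb)
      else if op = some "U" then backA dp fuel (i-1) (j-1) ("U" :: la) ("U" :: lb)
      else (i, j, la, lb)   -- unreachable: visited cells always carry one of the four tags

def label_elements_with_changes (A : List String) (B : List String) : List String × List String :=
  let dp := dpA A B
  let r := backA dp (A.length + B.length) A.length B.length [] []
  -- trailing 'while j > 0' / 'while i > 0' loops: prepend that many 'A' / 'D' labels
  (List.replicate r.1 "D" ++ r.2.2.1, List.replicate r.2.1 "A" ++ r.2.2.2)

-- ===== PORT B =====
-- A cell of B's rolling row: (cost, script for A, script for B); Python's cons chain ('x', t)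
-- is List String with the LAST operation at the head (None = []).
-- first Python loop building row 0: appends m times, each step reading the last cell
def topRowT : Nat → (Int × List String × List String) → List (Int × List String × List String)
  | 0, t => [t]
  | k+1, t => t :: topRowT k (t.1 + 1, t.2.1, "A" :: t.2.2)

-- inner j-loop: walks B; `prev` is the previous row from index j-1 on; `left` is cur[j-1]
def rowEntriesT (a : String) : List String → List (Int × List String × List String) → (Int × List String × List String) → List (Int × List String × List String)
  | [], _, _ => []
  | b :: bs, prev, left =>
    let diag := prev.headD (0, [], [])
    let up := prev.tail.headD (0, [], [])
    let e := if a = b then (diag.1, "U" :: diag.2.1, "U" :: diag.2.2)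
      else
        let cd := up.1 + 1
        let ca := left.1 + 1
        let cs := diag.1 + 1
        if cd ≤ ca ∧ cd ≤ cs then (cd, "D" :: up.2.1, up.2.2)
        else if ca ≤ cs then (ca, left.2.1, "A" :: left.2.2)
        else (cs, "S" :: diag.2.1, "S" :: diag.2.2)
    e :: rowEntriesT a bs prev.tail e

def rowT (a : String) (B : List String) (prev : List (Int × List String × List String)) : List (Int × List String × List String) :=
  let h := prev.headD (0, [], [])
  let c0 := (h.1 + 1, "D" :: h.2.1, h.2.2)
  c0 :: rowEntriesT a B prev c0

-- outer i-loop: replaces prev by the freshly built row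
def fillT (B : List String) : List String → List (Int × List String × List String) → List (Int × List String × List String)
  | [], prev => prev
  | a :: as_, prev => fillT B as_ (rowT a B prev)

def label_elements_with_changes_alt (A : List String) (B : List String) : List String × List String :=
  let fin := fillT B A (topRowT B.length (0, [], []))
  let t := fin.getD B.length (0, [], [])
  -- unwinding the cons chains and reversing = List.reverse
  (t.2.1.reverse, t.2.2.reverse)

-- ===== PRECONDITION & SPEC =====
def Spec_label_elements_with_changes (A : List String) (B : List String) (out : List String × List String) : Prop := out = label_elements_with_changes_alt A B
instance (A : List String) (B : List String) (out : List String × List String) : Decidable (Spec_label_elements_with_changes A B out) := by unfold Spec_label_elements_with_changes; infer_instance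

-- ===== CLAIM (what is proved, stated in full; the proofs are below) =====
def Claim_equal_label_elements_with_changes : Prop := ∀ (A : List String) (B : List String), Dom_label_elements_with_changes A B → Spec_label_elements_with_changes A B (label_elements_with_changes A B)

-- ===== LEMMAS AND PROOFS =====

-- cell accessors (proof-only shorthands)
def cA (A B : List String) (i j : Nat) : Int × Option String := (((dpA A B).getD i []).getD j (0, none))

def dpRowsT (B : List String) : List String → List (Int × List String × List String) → List (List (Int × List String × List String))
  | [], _ => []
  | a :: as_, prev => rowT a B prev :: dpRowsT B as_ (rowT a B prev)

def dpT (A B : List String) : List (List (Int × List String × List String)) :=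
  topRowT B.length (0, [], []) :: dpRowsT B A (topRowT B.length (0, [], []))

def cT (A B : List String) (i j : Nat) : Int × List String × List String :=
  ((dpT A B).getD i []).getD j (0, [], [])

theorem fillT_eq (B : List String) : ∀ (As : List String) (prev : List (Int × List String × List String)),
    fillT B As prev = (prev :: dpRowsT B As prev).getD As.length [] := by
  intro As
  induction As with
  | nil => intro prev; rfl
  | cons a as ih => intro prev; simpa [fillT, dpRowsT] using ih (rowT a B prev)

-- small getD helpers
theorem getD_tail {α : Type} (l : List α) (k : Nat) (d : α) : l.tail.getD k d = l.getD (k+1) d := by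
  cases l <;> rfl

theorem headD_getD {α : Type} (l : List α) (d : α) : l.headD d = l.getD 0 d := by
  cases l <;> rfl

theorem headD_tail_getD {α : Type} (l : List α) (d : α) : l.tail.headD d = l.getD 1 d := by
  rw [headD_getD, getD_tail]

-- row recurrence for dpA
theorem dpRows_succ_getD (B : List String) (As : List String) (i0 : Int)
    (prev : List (Int × Option String)) (k : Nat) (hk : k < As.length) :
    (prev :: dpRowsA B As i0 prev).getD (k+1) [] =
      rowA (As.getD k "") B (i0 + k) ((prev :: dpRowsA B As i0 prev).getD k []) := by
  induction As generalizing i0 prev k with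
  | nil => simp at hk
  | cons a as ih =>
    cases k with
    | zero => simp [dpRowsA]
    | succ k =>
      have hk' : k < as.length := by simpa using hk
      have := ih (i0 + 1) (rowA a B i0 prev) k hk'
      simp only [dpRowsA, List.getD_cons_succ] at this ⊢
      have hcast : i0 + 1 + (k : Int) = i0 + ((k : Int) + 1) := by ring
      rw [hcast] at this
      simpa using this

theorem dpA_succ (A B : List String) (k : Nat) (hk : k < A.length) :
    (dpA A B).getD (k+1) [] = rowA (A.getD k "") B (1 + k) ((dpA A B).getD k []) := by
  simpa [dpA] using dpRows_succ_getD B A 1 (row0A B.length) k hk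

-- row recurrence for dpT
theorem dpRowsT_succ_getD (B : List String) (As : List String)
    (prev : List (Int × List String × List String)) (k : Nat) (hk : k < As.length) :
    (prev :: dpRowsT B As prev).getD (k+1) [] =
      rowT (As.getD k "") B ((prev :: dpRowsT B As prev).getD k []) := by
  induction As generalizing prev k with
  | nil => simp at hk
  | cons a as ih =>
    cases k with
    | zero => simp [dpRowsT]
    | succ k =>
      have hk' : k < as.length := by simpa using hk
      have := ih (rowT a B prev) k hk'
      simp only [dpRowsT, List.getD_cons_succ] at this ⊢
      simpa using this

theorem dpT_succ (A B : List String) (k : Nat) (hk : k < A.length) :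
    (dpT A B).getD (k+1) [] = rowT (A.getD k "") B ((dpT A B).getD k []) := by
  simpa [dpT] using dpRowsT_succ_getD B A (topRowT B.length (0, [], [])) k hk

-- getD characterization of A's inner loop output
theorem rowEntriesA_getD (a : String) (bs : List String) (prev : List (Int × Option String))
    (left : Int × Option String) (k : Nat) (hk : k < bs.length) :
    (rowEntriesA a bs prev left).getD k (0, none) =
      (if a = bs.getD k "" then ((prev.getD k (0, none)).1, some "U")
       else pyMin3A ((prev.getD (k+1) (0, none)).1 + 1, some "D")
                    (((if k = 0 then left else (rowEntriesA a bs prev left).getD (k-1) (0, none))).1 + 1, some "A")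
                    ((prev.getD k (0, none)).1 + 1, some "S")) := by
  induction bs generalizing prev left k with
  | nil => simp at hk
  | cons b bs ih =>
    cases k with
    | zero =>
      simp only [rowEntriesA, List.getD_cons_zero]
      rw [headD_getD, headD_tail_getD]
      simp
    | succ k =>
      have hk' : k < bs.length := by simpa using hk
      simp only [rowEntriesA, List.getD_cons_succ]
      rw [ih prev.tail _ k hk']
      simp only [getD_tail]
      congr 1
      cases k with
      | zero => simp
      | succ k => simp

-- getD characterization of B's inner loop output
theorem rowEntriesT_getD (a : String) (bs : List String) (prev : List (Int × List String × List String))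
    (left : Int × List String × List String) (k : Nat) (hk : k < bs.length) :
    (rowEntriesT a bs prev left).getD k (0, [], []) =
      (if a = bs.getD k "" then
        ((prev.getD k (0, [], [])).1, "U" :: (prev.getD k (0, [], [])).2.1, "U" :: (prev.getD k (0, [], [])).2.2)
       else
        let up := prev.getD (k+1) (0, [], [])
        let lf := if k = 0 then left else (rowEntriesT a bs prev left).getD (k-1) (0, [], [])
        let dg := prev.getD k (0, [], [])
        if up.1 + 1 ≤ lf.1 + 1 ∧ up.1 + 1 ≤ dg.1 + 1 then (up.1 + 1, "D" :: up.2.1, up.2.2)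
        else if lf.1 + 1 ≤ dg.1 + 1 then (lf.1 + 1, lf.2.1, "A" :: lf.2.2)
        else (dg.1 + 1, "S" :: dg.2.1, "S" :: dg.2.2)) := by
  induction bs generalizing prev left k with
  | nil => simp at hk
  | cons b bs ih =>
    cases k with
    | zero =>
      simp only [rowEntriesT, List.getD_cons_zero]
      rw [headD_getD, headD_tail_getD]
      simp
    | succ k =>
      have hk' : k < bs.length := by simpa using hk
      simp only [rowEntriesT, List.getD_cons_succ]
      rw [ih prev.tail _ k hk']
      simp only [getD_tail]
      congr 1
      cases k with
      | zero => simp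
      | succ k => simp

-- boundary cells of dpA
theorem cA_left (A B : List String) (i : Nat) (hi : i < A.length) :
    cA A B (i+1) 0 = ((1 + i : Int), some "D") := by
  simp only [cA]
  rw [dpA_succ A B i hi]
  rfl

theorem cA_top (A B : List String) (j : Nat) (hj : j < B.length) :
    cA A B 0 (j+1) = ((j + 1 : Int), some "A") := by
  simp only [cA, dpA, List.getD_cons_zero, row0A, List.getD_cons_succ]
  rw [List.getD_eq_getElem _ _ (by simpa using hj), List.getElem_map, List.getElem_range]

theorem cA_zero (A B : List String) : cA A B 0 0 = (0, none) := rfl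

-- interior cells of dpA
theorem cA_interior (A B : List String) (i j : Nat) (hi : i < A.length) (hj : j < B.length) :
    cA A B (i+1) (j+1) =
      (if A.getD i "" = B.getD j "" then ((cA A B i j).1, some "U")
       else pyMin3A ((cA A B i (j+1)).1 + 1, some "D")
                    ((cA A B (i+1) j).1 + 1, some "A")
                    ((cA A B i j).1 + 1, some "S")) := by
  have hrow := dpA_succ A B i hi
  simp only [cA, hrow, rowA, List.getD_cons_succ]
  rw [rowEntriesA_getD _ _ _ _ j hj]
  cases j with
  | zero => rfl
  | succ j => simp

-- cells of dpT
theorem topRowT_getD_zero (k : Nat) (t : Int × List String × List String) :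
    (topRowT k t).getD 0 (0, [], []) = t := by
  cases k <;> rfl

theorem cT_zero (A B : List String) : cT A B 0 0 = (0, [], []) := by
  simp only [cT, dpT, List.getD_cons_zero]
  exact topRowT_getD_zero _ _

theorem topRowT_getD_step (k j : Nat) (t : Int × List String × List String) (hj : j < k) :
    (topRowT k t).getD (j+1) (0, [], []) =
      (((topRowT k t).getD j (0, [], [])).1 + 1,
       ((topRowT k t).getD j (0, [], [])).2.1,
       "A" :: ((topRowT k t).getD j (0, [], [])).2.2) := by
  induction k generalizing j t with
  | zero => omega
  | succ k ih =>
    cases j with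
    | zero =>
      simp only [topRowT, List.getD_cons_succ, List.getD_cons_zero]
      rw [topRowT_getD_zero]
    | succ j =>
      simp only [topRowT, List.getD_cons_succ]
      exact ih j _ (by omega)

theorem cT_top (A B : List String) (j : Nat) (hj : j < B.length) :
    cT A B 0 (j+1) =
      ((cT A B 0 j).1 + 1, (cT A B 0 j).2.1, "A" :: (cT A B 0 j).2.2) := by
  simp only [cT, dpT, List.getD_cons_zero]
  exact topRowT_getD_step _ j _ hj

theorem cT_left (A B : List String) (i : Nat) (hi : i < A.length) :
    cT A B (i+1) 0 =
      ((cT A B i 0).1 + 1, "D" :: (cT A B i 0).2.1, (cT A B i 0).2.2) := by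
  simp only [cT]
  rw [dpT_succ A B i hi]
  simp only [rowT, List.getD_cons_zero]
  rw [headD_getD]

theorem cT_interior (A B : List String) (i j : Nat) (hi : i < A.length) (hj : j < B.length) :
    cT A B (i+1) (j+1) =
      (if A.getD i "" = B.getD j "" then
        ((cT A B i j).1, "U" :: (cT A B i j).2.1, "U" :: (cT A B i j).2.2)
       else
        if (cT A B i (j+1)).1 + 1 ≤ (cT A B (i+1) j).1 + 1 ∧ (cT A B i (j+1)).1 + 1 ≤ (cT A B i j).1 + 1 then
          ((cT A B i (j+1)).1 + 1, "D" :: (cT A B i (j+1)).2.1, (cT A B i (j+1)).2.2)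
        else if (cT A B (i+1) j).1 + 1 ≤ (cT A B i j).1 + 1 then
          ((cT A B (i+1) j).1 + 1, (cT A B (i+1) j).2.1, "A" :: (cT A B (i+1) j).2.2)
        else ((cT A B i j).1 + 1, "S" :: (cT A B i j).2.1, "S" :: (cT A B i j).2.2)) := by
  have hrow := dpT_succ A B i hi
  simp only [cT, hrow, rowT, List.getD_cons_succ]
  rw [rowEntriesT_getD _ _ _ _ j hj]
  cases j with
  | zero => simp
  | succ j => simp
-- Python's ordered min re-expressed as B's branch conditions
theorem pyMin3A_eq (d l g : Int) :
    pyMin3A (d, some "D") (l, some "A") (g, some "S") =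
      if d ≤ l ∧ d ≤ g then (d, some "D")
      else if l ≤ g then (l, some "A")
      else (g, some "S") := by
  simp only [pyMin3A]
  split_ifs <;> simp_all <;> omega

-- boundary cost values of dpA
theorem cA_top_fst (A B : List String) (j : Nat) (hj : j ≤ B.length) : (cA A B 0 j).1 = j := by
  cases j with
  | zero => rfl
  | succ j => rw [cA_top A B j (by omega)]; push_cast; ring

theorem cA_left_fst (A B : List String) (i : Nat) (hi : i ≤ A.length) : (cA A B i 0).1 = i := by
  cases i with
  | zero => rfl
  | succ i => rw [cA_left A B i (by omega)]; push_cast; ring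

-- main invariant: B's cell (i,j) has A's cost, and its scripts, reversed, are exactly what A's
-- backtracking from (i,j) prepends
theorem inv_cells (A B : List String) : ∀ s i j, i + j = s → i ≤ A.length → j ≤ B.length →
    (cT A B i j).1 = (cA A B i j).1 ∧
    ∀ fuel la lb, i + j ≤ fuel →
      backA (dpA A B) fuel i j la lb =
        (0, 0, (cT A B i j).2.1.reverse ++ la, (cT A B i j).2.2.reverse ++ lb) := by
  intro s
  induction s using Nat.strong_induction_on with
  | _ s ih =>
    intro i j hs hi hj
    cases i with
    | zero =>
      cases j with
      | zero =>
        refine ⟨by rw [cT_zero, cA_zero], ?_⟩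
        intro fuel la lb _
        rw [cT_zero]
        cases fuel <;> simp [backA]
      | succ j' =>
        have hj' : j' < B.length := by omega
        obtain ⟨ihc, ihb⟩ := ih (0 + j') (by omega) 0 j' rfl (by omega) (by omega)
        have hstep := cT_top A B j' hj'
        have hA := cA_top A B j' hj'
        refine ⟨?_, ?_⟩
        · rw [hstep, hA, ihc, cA_top_fst A B j' (by omega)]
        · intro fuel la lb hf
          obtain ⟨f, rfl⟩ : ∃ f, fuel = f + 1 := ⟨fuel - 1, by omega⟩
          have hop : (((dpA A B).getD 0 []).getD (j'+1) (0, none)).2 = some "A" := by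
            have h := hA
            simp only [cA] at h
            rw [h]
          have H := ihb f la ("A" :: lb) (by omega)
          simp only [backA]
          rw [hop]
          simp only [hstep, List.reverse_cons]
          simpa using H
    | succ i' =>
      have hi' : i' < A.length := by omega
      cases j with
      | zero =>
        obtain ⟨ihc, ihb⟩ := ih (i' + 0) (by omega) i' 0 rfl (by omega) (by omega)
        have hstep := cT_left A B i' hi'
        have hA := cA_left A B i' hi'
        refine ⟨?_, ?_⟩
        · rw [hstep, hA, ihc, cA_left_fst A B i' (by omega)]; push_cast; ring
        · intro fuel la lb hf
          obtain ⟨f, rfl⟩ : ∃ f, fuel = f + 1 := ⟨fuel - 1, by omega⟩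
          have hop : (((dpA A B).getD (i'+1) []).getD 0 (0, none)).2 = some "D" := by
            have h := hA
            simp only [cA] at h
            rw [h]
          have H := ihb f ("D" :: la) lb (by omega)
          simp only [backA]
          rw [hop]
          simp only [hstep, List.reverse_cons]
          simpa using H
      | succ j' =>
        have hj' : j' < B.length := by omega
        obtain ⟨c1, b1⟩ := ih (i' + (j'+1)) (by omega) i' (j'+1) rfl (by omega) (by omega)
        obtain ⟨c2, b2⟩ := ih ((i'+1) + j') (by omega) (i'+1) j' rfl (by omega) (by omega)
        obtain ⟨c3, b3⟩ := ih (i' + j') (by omega) i' j' rfl (by omega) (by omega)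
        have hcA := cA_interior A B i' j' hi' hj'
        have hcT := cT_interior A B i' j' hi' hj'
        by_cases heq : A.getD i' "" = B.getD j' ""
        · rw [if_pos heq] at hcA hcT
          refine ⟨by rw [hcT, hcA]; simp [c3], ?_⟩
          intro fuel la lb hf
          obtain ⟨f, rfl⟩ : ∃ f, fuel = f + 1 := ⟨fuel - 1, by omega⟩
          have hop : (((dpA A B).getD (i'+1) []).getD (j'+1) (0, none)).2 = some "U" := by
            have h := hcA
            simp only [cA] at h
            rw [h]
          have H := b3 f ("U" :: la) ("U" :: lb) (by omega)
          simp only [backA]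
          rw [hop]
          simp only [hcT, List.reverse_cons]
          simpa using H
        · rw [if_neg heq] at hcA hcT
          rw [pyMin3A_eq] at hcA
          rw [c1, c2, c3] at hcT
          by_cases hd : (cA A B i' (j'+1)).1 + 1 ≤ (cA A B (i'+1) j').1 + 1 ∧
              (cA A B i' (j'+1)).1 + 1 ≤ (cA A B i' j').1 + 1
          · rw [if_pos hd] at hcT
            rw [if_pos hd] at hcA
            refine ⟨by rw [hcT, hcA], ?_⟩
            intro fuel la lb hf
            obtain ⟨f, rfl⟩ : ∃ f, fuel = f + 1 := ⟨fuel - 1, by omega⟩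
            have hop : (((dpA A B).getD (i'+1) []).getD (j'+1) (0, none)).2 = some "D" := by
              have h := hcA
              simp only [cA] at h
              rw [h]
            have H := b1 f ("D" :: la) lb (by omega)
            simp only [backA]
            rw [hop]
            simp only [hcT, List.reverse_cons]
            simpa using H
          · rw [if_neg hd] at hcT
            rw [if_neg hd] at hcA
            by_cases hl : (cA A B (i'+1) j').1 + 1 ≤ (cA A B i' j').1 + 1
            · rw [if_pos hl] at hcT
              rw [if_pos hl] at hcA
              refine ⟨by rw [hcT, hcA], ?_⟩
              intro fuel la lb hf
              obtain ⟨f, rfl⟩ : ∃ f, fuel = f + 1 := ⟨fuel - 1, by omega⟩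
              have hop : (((dpA A B).getD (i'+1) []).getD (j'+1) (0, none)).2 = some "A" := by
                have h := hcA
                simp only [cA] at h
                rw [h]
              have H := b2 f la ("A" :: lb) (by omega)
              simp only [backA]
              rw [hop]
              simp only [hcT, List.reverse_cons]
              simpa using H
            · rw [if_neg hl] at hcT
              rw [if_neg hl] at hcA
              refine ⟨by rw [hcT, hcA], ?_⟩
              intro fuel la lb hf
              obtain ⟨f, rfl⟩ : ∃ f, fuel = f + 1 := ⟨fuel - 1, by omega⟩
              have hop : (((dpA A B).getD (i'+1) []).getD (j'+1) (0, none)).2 = some "S" := by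
                have h := hcA
                simp only [cA] at h
                rw [h]
              have H := b3 f ("S" :: la) ("S" :: lb) (by omega)
              simp only [backA]
              rw [hop]
              simp only [hcT, List.reverse_cons]
              simpa using H

-- ===== VERDICT (by name: the statement is the Claim_ definition above) =====
theorem label_elements_with_changes_spec : Claim_equal_label_elements_with_changes := by
  intro A B _
  obtain ⟨hc, hb⟩ := inv_cells A B (A.length + B.length) A.length B.length rfl le_rfl le_rfl
  have h := hb (A.length + B.length) [] [] le_rfl
  unfold Spec_label_elements_with_changes
  simp only [label_elements_with_changes, label_elements_with_changes_alt, h]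
  rw [fillT_eq]
  simp only [List.append_nil, List.replicate_zero, List.nil_append]
  rfl
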